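-- pv_equiv track=rewrite | github.com/jameswmccarty/PythonChallenge | 32.py | find_unis
-- ===== SOURCE A (Python) =====
-- def find_unis(ruleset):
-- 	flt = []
-- 	for i in range(len(ruleset[0])):
-- 		flt.append((i,set()))
--
-- 	for rule in ruleset:
-- 		for i in range(len(flt)):
-- 			flt[i][1].add(rule[i])
--
-- 	flt = [ x for x in flt if len(x[1]) == 1 ]
--
-- 	return flt
-- ===== SOURCE B (Python) =====
-- def find_unis(ruleset):
-- 	out = []
-- 	for i in range(len(ruleset[0])):
-- 		s = set(rule[i] for rule in ruleset)
-- 		if len(s) == 1: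
-- 			out.append((i, s))
-- 	return out
-- ===== Notes on version B (the rewrite author's own statement) =====
-- stated objective: simpler
-- what changed: Replaces A's pre-built accumulator of (index, set) pairs filled row by row (row-major nested loops plus a final filter pass) with a single column-major loop that builds each column's set in one expression and appends it only when it is a singleton.
import Mathlib
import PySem

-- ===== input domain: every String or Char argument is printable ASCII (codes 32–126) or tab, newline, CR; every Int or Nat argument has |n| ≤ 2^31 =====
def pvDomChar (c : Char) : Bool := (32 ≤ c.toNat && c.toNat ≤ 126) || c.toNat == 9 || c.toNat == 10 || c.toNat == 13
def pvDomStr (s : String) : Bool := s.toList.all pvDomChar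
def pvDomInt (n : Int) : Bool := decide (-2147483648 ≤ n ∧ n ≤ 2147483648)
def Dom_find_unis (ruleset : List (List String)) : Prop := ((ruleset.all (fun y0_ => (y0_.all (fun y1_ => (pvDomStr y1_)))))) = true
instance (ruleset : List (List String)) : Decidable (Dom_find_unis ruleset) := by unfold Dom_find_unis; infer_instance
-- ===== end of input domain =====

-- B replaces A's pre-built accumulator of (index, set) pairs, filled row by row, with a direct
-- column-major pass that builds each column's set in one expression (objective: simpler).

-- ===== PORT A =====
-- inner loop 'for i in range(len(flt)): flt[i][1].add(rule[i])' as structural recursion over flt,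
-- tracking the running index i; rule[i] is in range under Pre_, so pyGetD's default is never used there
def findUnisAddRow (rule : List String) (i : Int) :
    List (Int × PySem.Set String) → List (Int × PySem.Set String)
  | [] => []
  | (j, s) :: rest =>
      (j, PySem.Set.add s (PySem.List.pyGetD rule i "")) :: findUnisAddRow rule (i + 1) rest

def find_unis (ruleset : List (List String)) : List (Int × List String) :=
  let flt : List (Int × PySem.Set String) :=
    (PySem.List.pyRange 0 ((PySem.List.pyGetD ruleset 0 []).length) 1).map
      (fun i => (i, PySem.Set.empty))
  let flt := ruleset.foldl (fun flt rule => findUnisAddRow rule 0 flt) flt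
  flt.filter (fun x => PySem.Set.len x.2 == 1)

-- ===== PORT B =====
def find_unis_alt (ruleset : List (List String)) : List (Int × List String) :=
  ((PySem.List.pyRange 0 ((PySem.List.pyGetD ruleset 0 []).length) 1).map
      (fun i => (i, PySem.Set.ofList (ruleset.map (fun rule => PySem.List.pyGetD rule i "")))))
    |>.filter (fun x => PySem.Set.len x.2 == 1)

-- ===== PRECONDITION & SPEC =====
-- Pre_ excludes exactly the inputs where A raises IndexError: the empty ruleset (ruleset[0])
-- and ragged rulesets with a row shorter than the first row (rule[i]); B raises there too.
def Pre_find_unis (ruleset : List (List String)) : Prop :=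
  ruleset ≠ [] ∧ ∀ rule ∈ ruleset, (ruleset.headD []).length ≤ rule.length
instance (ruleset : List (List String)) : Decidable (Pre_find_unis ruleset) := by
  unfold Pre_find_unis; infer_instance
def pvWitness_find_unis : List (List String) := [["a", "b"], ["a", "c"]]

def Spec_find_unis (ruleset : List (List String)) (out : List (Int × List String)) : Prop := out = find_unis_alt ruleset
instance (ruleset : List (List String)) (out : List (Int × List String)) : Decidable (Spec_find_unis ruleset out) := by unfold Spec_find_unis; infer_instance

-- ===== CLAIM (what is proved, stated in full; the proofs are below) =====
def Claim_equal_find_unis : Prop := ∀ (ruleset : List (List String)), Dom_find_unis ruleset → Pre_find_unis ruleset → Spec_find_unis ruleset (find_unis ruleset)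

-- ===== LEMMAS AND PROOFS =====

-- one sweep of A's inner loop over a list of (index, set) pairs whose indices run consecutively
-- from a adds rule[i] to the set paired with each index i
theorem findUnisAddRow_map (rule : List String) :
    ∀ (L : List Int) (a : Int) (g : Int → PySem.Set String),
      (∀ (k : Nat) (hk : k < L.length), L[k] = a + k) →
      findUnisAddRow rule a (L.map (fun i => (i, g i))) =
        L.map (fun i => (i, PySem.Set.add (g i) (PySem.List.pyGetD rule i ""))) := by
  intro L
  induction L with
  | nil => intro a g _; rfl
  | cons i rest ih =>
      intro a g hL
      have hi : i = a := by simpa using hL 0 (by simp)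
      have hrest : ∀ (k : Nat) (hk : k < rest.length), rest[k] = (a + 1) + k := by
        intro k hk
        have := hL (k + 1) (by simpa using Nat.succ_lt_succ hk)
        simpa [Int.add_assoc, Int.add_comm 1 (k : Int)] using this
      simp [findUnisAddRow, hi, ih (a + 1) g hrest]

-- folding A's row loop over all rules turns each column's set into the fold of Set.add over
-- that column's entries
theorem foldl_findUnisAddRow (rules : List (List String)) :
    ∀ (L : List Int) (g : Int → PySem.Set String),
      (∀ (k : Nat) (hk : k < L.length), L[k] = (k : Int)) →
      rules.foldl (fun flt rule => findUnisAddRow rule 0 flt) (L.map (fun i => (i, g i))) =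
        L.map (fun i =>
          (i, rules.foldl (fun s rule => PySem.Set.add s (PySem.List.pyGetD rule i "")) (g i))) := by
  induction rules with
  | nil => intro L g _; rfl
  | cons rule rest ih =>
      intro L g hL
      have h0 : ∀ (k : Nat) (hk : k < L.length), L[k] = (0 : Int) + k := by
        intro k hk; rw [Int.zero_add]; exact hL k hk
      simp only [List.foldl_cons, findUnisAddRow_map rule L 0 g h0]
      exact ih L (fun i => PySem.Set.add (g i) (PySem.List.pyGetD rule i "")) hL

-- ===== VERDICT (by name: the statement is the Claim_ definition above) =====
theorem find_unis_spec : Claim_equal_find_unis := by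
  intro ruleset _ _
  simp only [Spec_find_unis, find_unis, find_unis_alt]
  have hL : ∀ (k : Nat)
      (hk : k < (PySem.List.pyRange 0 ((PySem.List.pyGetD ruleset 0 []).length) 1).length),
      (PySem.List.pyRange 0 ((PySem.List.pyGetD ruleset 0 []).length) 1)[k] = (k : Int) := by
    intro k hk
    simpa using PySem.List.getElem_pyRange_one 0 ((PySem.List.pyGetD ruleset 0 []).length : Int) k hk
  rw [foldl_findUnisAddRow ruleset _ (fun _ => PySem.Set.empty) hL]
  refine congrArg _ (List.map_congr_left ?_)
  intro i _
  refine congrArg _ ?_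
  rw [PySem.Set.ofList_eq_foldl, List.foldl_map]
  rfl
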